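-- pv_equiv track=rewrite | github.com/shan2312/DSA-Python-Solutions | DFS/valid_tree.py | is_valid_tree_detect_connection
-- ===== SOURCE A (Python) =====
-- class UnionFind:
--     def __init__(self, size):
--         self.parent = [i for i in range(size)]
--         self.height = [1]*size
--
--     def find(self, x):
--         if self.parent[x] == x:
--             return x
--
--         self.parent[x] = self.find(self.parent[x])
--         return self.parent[x]
--
--     def union(self, x, y):
--         root_x, root_y = self.find(x), self.find(y)
--         if root_x == root_y:
--             return False
--
--         if self.height[root_x] > self.height[root_y]:
--             self.parent[root_y] = root_x
--
--         elif self.height[root_x] < self.height[root_y]: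
--             self.parent[root_x] = root_y
--
--         else:
--             self.parent[root_y] = root_x
--             self.height[root_x] += 1
--         return True
--
-- def is_valid_tree_detect_connection(N, edges):
--     if len(edges) != (N - 1):
--         return False
--
--     uf_obj = UnionFind(N)
--
--     for node1, node2 in edges:
--         uf_obj.union(node1, node2)
--
--     a = set()
--     for i in range(N):
--         a.add(uf_obj.find(i))
--
--     return len(a) == 1
-- ===== SOURCE B (Python) =====
-- def is_valid_tree_detect_connection(N, edges):
--     # Flat component-label partition instead of a union-find forest:
--     # merge two components by relabeling one to the other.
--     if len(edges) != N - 1: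
--         return False
--     comp = list(range(N))
--     for u, v in edges:
--         cu, cv = comp[u], comp[v]
--         if cu != cv:
--             comp = [cu if c == cv else c for c in comp]
--     return all(c == comp[0] for c in comp)
-- ===== Notes on version B (the rewrite author's own statement) =====
-- stated objective: simpler
-- what changed: Replaces the union-find forest (recursive find with path compression, union by height, then a root-collecting pass) with a flat component-label array that merges two components by relabeling one to the other and finally checks all labels are equal.
import Mathlib
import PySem

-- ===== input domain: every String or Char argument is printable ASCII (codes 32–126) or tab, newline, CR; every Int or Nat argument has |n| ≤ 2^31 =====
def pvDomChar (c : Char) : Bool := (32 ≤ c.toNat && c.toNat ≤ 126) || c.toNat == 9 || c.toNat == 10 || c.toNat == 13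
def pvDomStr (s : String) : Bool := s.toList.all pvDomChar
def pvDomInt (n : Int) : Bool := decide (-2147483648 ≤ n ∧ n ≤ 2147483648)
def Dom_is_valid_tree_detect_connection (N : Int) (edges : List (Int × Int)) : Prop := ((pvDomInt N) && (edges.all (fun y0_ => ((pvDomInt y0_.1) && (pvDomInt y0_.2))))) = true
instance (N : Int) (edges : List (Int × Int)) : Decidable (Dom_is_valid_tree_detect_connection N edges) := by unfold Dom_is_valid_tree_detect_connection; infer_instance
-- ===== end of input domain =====

-- B replaces the union-find forest by a flat component-label array merged by relabeling; same result, no speed claim.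


-- ===== PORT A =====
-- UnionFind.find with path compression; the fuel (called with p.length + 1, always sufficient
-- under Pre_, see ufFind_spec) only makes Python's recursion structural.
def ufFind : Nat → List Int → Int → List Int × Int
  | 0, p, x => (p, x)
  | fuel+1, p, x =>
    let px := PySem.List.pyGetD p x 0
    if px = x then (p, x)
    else
      let r := ufFind fuel p px
      (PySem.List.pySetD r.1 x r.2, r.2)

-- UnionFind.union (state = (parent, height)); the Bool return of Python's union is never used by A.
def ufUnion (st : List Int × List Int) (x y : Int) : List Int × List Int :=
  let fx := ufFind (st.1.length + 1) st.1 x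
  let fy := ufFind (fx.1.length + 1) fx.1 y
  if fx.2 = fy.2 then (fy.1, st.2)
  else
    let hx := PySem.List.pyGetD st.2 fx.2 0
    let hy := PySem.List.pyGetD st.2 fy.2 0
    if hx > hy then (PySem.List.pySetD fy.1 fy.2 fx.2, st.2)
    else if hx < hy then (PySem.List.pySetD fy.1 fx.2 fy.2, st.2)
    else (PySem.List.pySetD fy.1 fy.2 fx.2, PySem.List.pySetD st.2 fx.2 (hx + 1))

def is_valid_tree_detect_connection (N : Int) (edges : List (Int × Int)) : Bool :=
  if (edges.length : Int) ≠ N - 1 then false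
  else
    let st := edges.foldl (fun st e => ufUnion st e.1 e.2)
      (PySem.List.pyRange 0 N 1, List.replicate N.toNat (1 : Int))
    let fin := (PySem.List.pyRange 0 N 1).foldl
      (fun (acc : List Int × PySem.Set Int) i =>
        let f := ufFind (acc.1.length + 1) acc.1 i
        (f.1, PySem.Set.add acc.2 f.2)) (st.1, PySem.Set.empty)
    fin.2.length == 1

-- ===== PORT B =====
def is_valid_tree_detect_connection_alt (N : Int) (edges : List (Int × Int)) : Bool :=
  if (edges.length : Int) ≠ N - 1 then false
  else
    let comp := edges.foldl (fun comp (e : Int × Int) =>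
      let cu := PySem.List.pyGetD comp e.1 0
      let cv := PySem.List.pyGetD comp e.2 0
      if cu ≠ cv then comp.map (fun c => if c = cv then cu else c) else comp)
      (PySem.List.pyRange 0 N 1)
    comp.all (fun c => c == PySem.List.pyGetD comp 0 0)

-- ===== PRECONDITION & SPEC =====
-- Pre_ excludes exactly the inputs on which A raises IndexError: when the edge-count guard
-- passes, every edge endpoint must be a valid Python index into a length-N list (B raises there too).
def Pre_is_valid_tree_detect_connection (N : Int) (edges : List (Int × Int)) : Prop :=
  (edges.length : Int) = N - 1 → ∀ e ∈ edges, (-N ≤ e.1 ∧ e.1 < N) ∧ (-N ≤ e.2 ∧ e.2 < N)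
instance (N : Int) (edges : List (Int × Int)) : Decidable (Pre_is_valid_tree_detect_connection N edges) := by unfold Pre_is_valid_tree_detect_connection; infer_instance

def pvWitness_is_valid_tree_detect_connection : Int × (List (Int × Int)) := (3, [(0, 1), (1, 2)])

def Spec_is_valid_tree_detect_connection (N : Int) (edges : List (Int × Int)) (out : Bool) : Prop := out = is_valid_tree_detect_connection_alt N edges
instance (N : Int) (edges : List (Int × Int)) (out : Bool) : Decidable (Spec_is_valid_tree_detect_connection N edges out) := by unfold Spec_is_valid_tree_detect_connection; infer_instance

-- ===== CLAIM (what is proved, stated in full; the proofs are below) =====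
def Claim_equal_is_valid_tree_detect_connection : Prop := ∀ (N : Int) (edges : List (Int × Int)), Dom_is_valid_tree_detect_connection N edges → Pre_is_valid_tree_detect_connection N edges → Spec_is_valid_tree_detect_connection N edges (is_valid_tree_detect_connection N edges)

-- ===== LEMMAS AND PROOFS =====

-- The Python index slot addressed by xs[x] in a length-n list, -n ≤ x < n.
def idx (n : Nat) (x : Int) : Nat := if x < 0 then n - (-x).toNat else x.toNat

lemma idx_lt (n : Nat) (x : Int) (h1 : -(n : Int) ≤ x) (h2 : x < n) : idx n x < n := by
  unfold idx; split <;> omega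

lemma idx_natCast (n s : Nat) (_h : s < n) : idx n (s : Int) = s := by
  unfold idx; split <;> omega

lemma pyIdx?_valid (n : Nat) (x : Int) (h1 : -(n : Int) ≤ x) (h2 : x < n) :
    PySem.List.pyIdx? n x = some (idx n x) := by
  unfold PySem.List.pyIdx? idx
  split <;> split <;> simp <;> omega

lemma pyGetD_idx (p : List Int) (x : Int) (d : Int)
    (h1 : -(p.length : Int) ≤ x) (h2 : x < p.length) :
    PySem.List.pyGetD p x d = p.getD (idx p.length x) d := by
  unfold PySem.List.pyGetD PySem.List.pyGet?
  rw [pyIdx?_valid _ _ h1 h2]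
  simp [List.getD]

lemma pySetD_idx (p : List Int) (x : Int) (v : Int)
    (h1 : -(p.length : Int) ≤ x) (h2 : x < p.length) :
    PySem.List.pySetD p x v = p.set (idx p.length x) v := by
  unfold PySem.List.pySetD PySem.List.pySet?
  rw [pyIdx?_valid _ _ h1 h2]
  simp

lemma getD_set_lt (p : List Int) (s j : Nat) (v : Int) (hs : s < p.length) :
    (p.set s v).getD j 0 = if j = s then v else p.getD j 0 := by
  simp only [List.getD, List.getElem?_set]
  rcases eq_or_ne s j with rfl | h
  · simp [hs]
  · simp [h, Ne.symm h]

-- ---- semantic layer: connectivity over normalized (slot) edges ----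
def slotRel (es : List (Nat × Nat)) (a b : Nat) : Prop := (a, b) ∈ es ∨ (b, a) ∈ es
def ConnE (es : List (Nat × Nat)) : Nat → Nat → Prop := Relation.EqvGen (slotRel es)

lemma conn_symm {es : List (Nat × Nat)} {i j : Nat} (h : ConnE es i j) : ConnE es j i :=
  Relation.EqvGen.symm _ _ h
lemma conn_trans {es : List (Nat × Nat)} {i j k : Nat} (h : ConnE es i j)
    (h' : ConnE es j k) : ConnE es i k := Relation.EqvGen.trans _ _ _ h h'

lemma conn_nil (i j : Nat) : ConnE [] i j ↔ i = j := by
  constructor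
  · intro h
    induction h with
    | rel a b hab => rcases hab with h | h <;> simp at h
    | refl a => rfl
    | symm a b _ ih => omega
    | trans a b c _ _ ih1 ih2 => omega
  · rintro rfl; exact Relation.EqvGen.refl i

lemma conn_append_single (es : List (Nat × Nat)) (u v i j : Nat) :
    ConnE (es ++ [(u, v)]) i j ↔
      ConnE es i j ∨ (ConnE es i u ∧ ConnE es v j) ∨ (ConnE es i v ∧ ConnE es u j) := by
  constructor
  · intro h
    induction h with
    | rel a b hab =>
      rcases hab with h | h <;> rw [List.mem_append] at h <;>
        rcases h with h | h
      · exact Or.inl (Relation.EqvGen.rel _ _ (Or.inl h))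
      · simp only [List.mem_singleton, Prod.mk.injEq] at h
        exact Or.inr (Or.inl ⟨h.1 ▸ Relation.EqvGen.refl a, h.2 ▸ Relation.EqvGen.refl b⟩)
      · exact Or.inl (Relation.EqvGen.rel _ _ (Or.inr h))
      · simp only [List.mem_singleton, Prod.mk.injEq] at h
        exact Or.inr (Or.inr ⟨h.2 ▸ Relation.EqvGen.refl a, h.1 ▸ Relation.EqvGen.refl b⟩)
    | refl a => exact Or.inl (Relation.EqvGen.refl a)
    | symm a b _ ih =>
      rcases ih with h | ⟨h1, h2⟩ | ⟨h1, h2⟩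
      · exact Or.inl (conn_symm h)
      · exact Or.inr (Or.inr ⟨conn_symm h2, conn_symm h1⟩)
      · exact Or.inr (Or.inl ⟨conn_symm h2, conn_symm h1⟩)
    | trans a b c _ _ ih1 ih2 =>
      rcases ih1 with h | ⟨h1, h2⟩ | ⟨h1, h2⟩ <;>
        rcases ih2 with g | ⟨g1, g2⟩ | ⟨g1, g2⟩
      · exact Or.inl (conn_trans h g)
      · exact Or.inr (Or.inl ⟨conn_trans h g1, g2⟩)
      · exact Or.inr (Or.inr ⟨conn_trans h g1, g2⟩)
      · exact Or.inr (Or.inl ⟨h1, conn_trans h2 g⟩)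
      · exact Or.inr (Or.inl ⟨h1, g2⟩)
      · exact Or.inl (conn_trans h1 g2)
      · exact Or.inr (Or.inr ⟨h1, conn_trans h2 g⟩)
      · exact Or.inl (conn_trans h1 g2)
      · exact Or.inr (Or.inr ⟨h1, g2⟩)
  · have hmono : ∀ a b, ConnE es a b → ConnE (es ++ [(u, v)]) a b := by
      intro a b hab
      exact Relation.EqvGen.mono
        (fun a b hab => by
          rcases hab with h | h
          · exact Or.inl (List.mem_append_left _ h)
          · exact Or.inr (List.mem_append_left _ h)) hab
    have huv : ConnE (es ++ [(u, v)]) u v :=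
      Relation.EqvGen.rel _ _ (Or.inl (List.mem_append_right _ (List.mem_singleton.mpr rfl)))
    rintro (h | ⟨h1, h2⟩ | ⟨h1, h2⟩)
    · exact hmono _ _ h
    · exact conn_trans (conn_trans (hmono _ _ h1) huv) (hmono _ _ h2)
    · exact conn_trans (conn_trans (hmono _ _ h1) (conn_symm huv)) (hmono _ _ h2)

-- a labeling f represents the partition of {0..n-1} into components of es
def RepL {γ : Type} (n : Nat) (f : Nat → γ) (es : List (Nat × Nat)) : Prop :=
  ∀ i j, i < n → j < n → (f i = f j ↔ ConnE es i j)

lemma rep_merge {γ : Type} [DecidableEq γ] (n : Nat) (f f' : Nat → γ) (es : List (Nat × Nat))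
    (u v : Nat) (hu : u < n) (hv : v < n) (hrep : RepL n f es)
    (hf' : ∀ i, i < n → f' i = if f i = f v then f u else f i) :
    RepL n f' (es ++ [(u, v)]) := by
  intro i j hi hj
  rw [conn_append_single, hf' i hi, hf' j hj]
  rw [← hrep i j hi hj, ← hrep i u hi hu, ← hrep i v hi hv,
      ← hrep u j hu hj, ← hrep v j hv hj]
  split_ifs with h1 h2 h2
  · exact ⟨fun _ => Or.inl (h1.trans h2.symm), fun _ => rfl⟩
  · constructor
    · intro h; exact Or.inr (Or.inr ⟨h1, h⟩)
    · rintro (h | ⟨ha, hb⟩ | ⟨ha, hb⟩)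
      · exact absurd (h.symm.trans h1) h2
      · exact absurd hb.symm h2
      · exact hb
  · constructor
    · intro h; exact Or.inr (Or.inl ⟨h, h2.symm⟩)
    · rintro (h | ⟨ha, hb⟩ | ⟨ha, hb⟩)
      · exact absurd (h.trans h2) h1
      · exact ha
      · exact absurd ha h1
  · constructor
    · intro h; exact Or.inl h
    · rintro (h | ⟨ha, hb⟩ | ⟨ha, hb⟩)
      · exact h
      · exact absurd hb.symm h2
      · exact absurd ha h1

lemma rep_swap {γ : Type} (n : Nat) (f : Nat → γ) (es : List (Nat × Nat)) (u v : Nat)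
    (h : RepL n f (es ++ [(v, u)])) : RepL n f (es ++ [(u, v)]) := by
  intro i j hi hj
  rw [h i j hi hj, conn_append_single, conn_append_single]
  tauto

-- ---- union-find state semantics ----
def pstep (p : List Int) (i : Nat) : Nat := (p.getD i 0).toNat
def IsRoot (p : List Int) (r : Nat) : Prop := pstep p r = r
def RootedAt (p : List Int) (i r : Nat) : Prop := (∃ k, (pstep p)^[k] i = r) ∧ IsRoot p r
noncomputable def rt (p : List Int) (i : Nat) : Nat :=
  @dite Nat (∃ r, RootedAt p i r) (Classical.propDecidable _) (fun h => h.choose) (fun _ => i)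
def Good (n : Nat) (p : List Int) : Prop :=
  p.length = n ∧ ∀ i, i < n → ∃ m : Nat, m < n ∧ p.getD i 0 = (m : Int)
def Rooted (n : Nat) (p : List Int) : Prop := ∀ i, i < n → ∃ r, RootedAt p i r
def UFInv (n : Nat) (p : List Int) : Prop := Good n p ∧ Rooted n p

lemma rootedAt_unique (p : List Int) (i r r' : Nat)
    (h : RootedAt p i r) (h' : RootedAt p i r') : r = r' := by
  obtain ⟨⟨k, hk⟩, hr⟩ := h
  obtain ⟨⟨k', hk'⟩, hr'⟩ := h'
  rcases le_total k k' with hle | hle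
  · have h2 : (pstep p)^[k'] i = r := by
      rw [show k' = (k' - k) + k by omega, Function.iterate_add_apply, hk,
        Function.iterate_fixed hr]
    rw [← h2, hk']
  · have h2 : (pstep p)^[k] i = r' := by
      rw [show k = (k - k') + k' by omega, Function.iterate_add_apply, hk',
        Function.iterate_fixed hr']
    rw [← h2, hk]

lemma rt_eq (p : List Int) (i r : Nat) (h : RootedAt p i r) : rt p i = r := by
  unfold rt
  rw [dif_pos ⟨r, h⟩]
  exact rootedAt_unique p i _ r (Exists.choose_spec ⟨r, h⟩) h

lemma rt_rootedAt (p : List Int) (i : Nat) (h : ∃ r, RootedAt p i r) :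
    RootedAt p i (rt p i) := by
  unfold rt
  rw [dif_pos h]
  exact Exists.choose_spec h

lemma isRoot_rt (n : Nat) (p : List Int) (i : Nat) (hR : Rooted n p) (hi : i < n) :
    IsRoot p (rt p i) := (rt_rootedAt p i (hR i hi)).2

lemma pstep_lt (n : Nat) (p : List Int) (i : Nat) (hG : Good n p) (hi : i < n) :
    pstep p i < n := by
  obtain ⟨m, hm, he⟩ := hG.2 i hi
  show (p.getD i 0).toNat < n
  rw [he]; simpa using hm

lemma iter_lt (n : Nat) (p : List Int) (i : Nat) (hG : Good n p) (hi : i < n) (k : Nat) :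
    (pstep p)^[k] i < n := by
  induction k with
  | zero => simpa using hi
  | succ k ih => rw [Function.iterate_succ_apply']; exact pstep_lt n p _ hG ih

lemma rt_lt (n : Nat) (p : List Int) (i : Nat) (h : UFInv n p) (hi : i < n) :
    rt p i < n := by
  obtain ⟨⟨k, hk⟩, _⟩ := rt_rootedAt p i (h.2 i hi)
  rw [← hk]; exact iter_lt n p i h.1 hi k

lemma rt_pstep (n : Nat) (p : List Int) (i : Nat) (h : UFInv n p) (hi : i < n) :
    rt p (pstep p i) = rt p i := by
  have hR := rt_rootedAt p i (h.2 i hi)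
  by_cases hroot : IsRoot p i
  · rw [hroot]
  · obtain ⟨⟨k, hk⟩, hr⟩ := hR
    cases k with
    | zero => simp at hk; rw [← hk] at hr; exact absurd hr hroot
    | succ k =>
      rw [Function.iterate_succ_apply] at hk
      exact rt_eq p _ _ ⟨⟨k, hk⟩, hr⟩

-- minimal chain length to the root is < n (pigeonhole on the distinct chain values)
lemma shorten (n : Nat) (p : List Int) (i r : Nat) (hG : Good n p) (hi : i < n)
    (h : RootedAt p i r) : ∃ k, k < n ∧ (pstep p)^[k] i = r := by
  obtain ⟨⟨k, hk⟩, hr⟩ := h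
  haveI : DecidablePred (fun m => IsRoot p ((pstep p)^[m] i)) :=
    fun _ => Classical.propDecidable _
  have hex : ∃ m, IsRoot p ((pstep p)^[m] i) := ⟨k, by rw [hk]; exact hr⟩
  let k0 := Nat.find hex
  have hk0 : IsRoot p ((pstep p)^[k0] i) := Nat.find_spec hex
  have hk0le : k0 ≤ k := Nat.find_min' hex (by rw [hk]; exact hr)
  have hval : (pstep p)^[k0] i = r := by
    rw [show k = (k - k0) + k0 by omega, Function.iterate_add_apply,
      Function.iterate_fixed hk0] at hk
    exact hk
  -- pigeonhole: the first k0+1 chain values are distinct and all < n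
  have key : ∀ na nb : Nat, na < nb → nb ≤ k0 →
      (pstep p)^[na] i = (pstep p)^[nb] i → False := by
    intro na nb hlt hble hab
    have hroot' : IsRoot p ((pstep p)^[k0 - (nb - na)] i) := by
      have heq : (pstep p)^[k0] i = (pstep p)^[k0 - (nb - na)] i := by
        have e1 : (pstep p)^[k0] i = (pstep p)^[k0 - nb] ((pstep p)^[nb] i) := by
          rw [← Function.iterate_add_apply]; congr 1; omega
        rw [← hab, ← Function.iterate_add_apply] at e1
        rw [e1]; congr 1; omega
      rw [← heq]; exact hk0
    exact Nat.find_min hex (m := k0 - (nb - na)) (by omega) hroot'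
  have hinj : Function.Injective
      (fun j : Fin (k0 + 1) => (⟨(pstep p)^[j.1] i, iter_lt n p i hG hi j.1⟩ : Fin n)) := by
    rintro ⟨na, hna⟩ ⟨nb, hnb⟩ hab
    simp only [Fin.mk.injEq] at hab ⊢
    by_contra hne
    rcases Nat.lt_or_ge na nb with hlt | hge
    · exact key na nb hlt (by omega) hab
    · exact key nb na (by omega) (by omega) hab.symm
  have hcard := Fintype.card_le_of_injective _ hinj
  simp only [Fintype.card_fin] at hcard
  exact ⟨k0, by omega, hval⟩

-- path compression: writing rt p s into slot s preserves the invariant and all roots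
lemma compress (n : Nat) (p : List Int) (s : Nat) (h : UFInv n p) (hs : s < n) :
    UFInv n (p.set s ((rt p s : Nat) : Int)) ∧
      ∀ i, i < n → rt (p.set s ((rt p s : Nat) : Int)) i = rt p i := by
  obtain ⟨⟨hlen, hent⟩, hroot⟩ := h
  have hUF : UFInv n p := ⟨⟨hlen, hent⟩, hroot⟩
  have hrlt : rt p s < n := rt_lt n p s hUF hs
  have hrs : RootedAt p s (rt p s) := rt_rootedAt p s (hroot s hs)
  have hslen : s < p.length := by omega
  set q := p.set s ((rt p s : Nat) : Int) with hq
  have hqlen : q.length = n := by simp [hq, hlen]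
  have hstep : ∀ j, pstep q j = if j = s then rt p s else pstep p j := by
    intro j
    show (q.getD j 0).toNat = _
    rw [hq, getD_set_lt p s j _ hslen]
    split
    · simp
    · rfl
  have hGq : Good n q := by
    refine ⟨hqlen, fun i hi => ?_⟩
    by_cases his : i = s
    · exact ⟨rt p s, hrlt, by rw [hq, getD_set_lt p s i _ hslen, if_pos his]⟩
    · obtain ⟨m, hm, he⟩ := hent i hi
      exact ⟨m, hm, by rw [hq, getD_set_lt p s i _ hslen, if_neg his]; exact he⟩
  have hrootq : ∀ t, IsRoot p t → IsRoot q t := by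
    intro t ht
    show pstep q t = t
    rw [hstep]
    split
    · rename_i hts
      subst hts
      exact rt_eq p t t ⟨⟨0, rfl⟩, ht⟩
    · exact ht
  have hrootqr : IsRoot q (rt p s) := by
    show pstep q (rt p s) = rt p s
    rw [hstep]
    split
    · rfl
    · exact hrs.2
  have hRs : RootedAt q s (rt p s) :=
    ⟨⟨1, by simp [hstep]⟩, hrootqr⟩
  have chain : ∀ k i, i < n → (pstep p)^[k] i = rt p i → RootedAt q i (rt p i) := by
    intro k
    induction k with
    | zero =>
      intro i hi he
      by_cases his : i = s
      · subst his; exact hRs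
      · simp only [Function.iterate_zero, id_eq] at he
        have hri : IsRoot p i := by rw [he]; exact isRoot_rt n p i hroot hi
        rw [← he]
        exact ⟨⟨0, rfl⟩, hrootq i hri⟩
    | succ k ih =>
      intro i hi he
      by_cases his : i = s
      · subst his; exact hRs
      · have hstepi : pstep q i = pstep p i := by rw [hstep, if_neg his]
        have hplt : pstep p i < n := pstep_lt n p i ⟨hlen, hent⟩ hi
        have he' : (pstep p)^[k] (pstep p i) = rt p (pstep p i) := by
          rw [rt_pstep n p i hUF hi, ← Function.iterate_succ_apply]; exact he
        have hrec := ih (pstep p i) hplt he'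
        rw [rt_pstep n p i hUF hi] at hrec
        obtain ⟨⟨k', hk'⟩, hr'⟩ := hrec
        exact ⟨⟨k' + 1, by rw [Function.iterate_succ_apply, hstepi]; exact hk'⟩, hr'⟩
  have hRq : Rooted n q := by
    intro i hi
    obtain ⟨⟨k, hk⟩, _⟩ := rt_rootedAt p i (hroot i hi)
    exact ⟨rt p i, chain k i hi hk⟩
  refine ⟨⟨hGq, hRq⟩, fun i hi => ?_⟩
  obtain ⟨⟨k, hk⟩, _⟩ := rt_rootedAt p i (hroot i hi)
  exact rt_eq q i (rt p i) (chain k i hi hk)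

-- linking root b under root a joins the two classes
lemma link (n : Nat) (p : List Int) (a b : Nat) (h : UFInv n p) (ha : a < n) (hb : b < n)
    (hra : IsRoot p a) (hrb : IsRoot p b) (hne : a ≠ b) :
    UFInv n (p.set b ((a : Nat) : Int)) ∧
      ∀ i, i < n → rt (p.set b ((a : Nat) : Int)) i = if rt p i = b then a else rt p i := by
  obtain ⟨⟨hlen, hent⟩, hroot⟩ := h
  have hUF : UFInv n p := ⟨⟨hlen, hent⟩, hroot⟩
  have hblen : b < p.length := by omega
  set q := p.set b ((a : Nat) : Int) with hq
  have hqlen : q.length = n := by simp [hq, hlen]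
  have hstep : ∀ j, pstep q j = if j = b then a else pstep p j := by
    intro j
    show (q.getD j 0).toNat = _
    rw [hq, getD_set_lt p b j _ hblen]
    split
    · simp
    · rfl
  have hGq : Good n q := by
    refine ⟨hqlen, fun i hi => ?_⟩
    by_cases hib : i = b
    · exact ⟨a, ha, by rw [hq, getD_set_lt p b i _ hblen, if_pos hib]⟩
    · obtain ⟨m, hm, he⟩ := hent i hi
      exact ⟨m, hm, by rw [hq, getD_set_lt p b i _ hblen, if_neg hib]; exact he⟩
  have hrootqa : IsRoot q a := by
    show pstep q a = a
    rw [hstep, if_neg hne]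
    exact hra
  have hrootq : ∀ t, t ≠ b → IsRoot p t → IsRoot q t := by
    intro t htb ht
    show pstep q t = t
    rw [hstep, if_neg htb]
    exact ht
  have hRb : RootedAt q b a := ⟨⟨1, by simp [hstep]⟩, hrootqa⟩
  have hrtb : rt p b = b := rt_eq p b b ⟨⟨0, rfl⟩, hrb⟩
  have chain : ∀ k i, i < n → (pstep p)^[k] i = rt p i →
      RootedAt q i (if rt p i = b then a else rt p i) := by
    intro k
    induction k with
    | zero =>
      intro i hi he
      simp only [Function.iterate_zero, id_eq] at he
      by_cases hib : i = b
      · subst hib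
        rw [hrtb, if_pos rfl]
        exact hRb
      · have hri : IsRoot p i := by rw [he]; exact isRoot_rt n p i hroot hi
        rw [← he, if_neg hib]
        exact ⟨⟨0, rfl⟩, hrootq i hib hri⟩
    | succ k ih =>
      intro i hi he
      by_cases hib : i = b
      · subst hib
        rw [hrtb, if_pos rfl]
        exact hRb
      · have hstepi : pstep q i = pstep p i := by rw [hstep, if_neg hib]
        have hplt : pstep p i < n := pstep_lt n p i ⟨hlen, hent⟩ hi
        have he' : (pstep p)^[k] (pstep p i) = rt p (pstep p i) := by
          rw [rt_pstep n p i hUF hi, ← Function.iterate_succ_apply]; exact he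
        have hrec := ih (pstep p i) hplt he'
        rw [rt_pstep n p i hUF hi] at hrec
        obtain ⟨⟨k', hk'⟩, hr'⟩ := hrec
        exact ⟨⟨k' + 1, by rw [Function.iterate_succ_apply, hstepi]; exact hk'⟩, hr'⟩
  have hRq : Rooted n q := by
    intro i hi
    obtain ⟨⟨k, hk⟩, _⟩ := rt_rootedAt p i (hroot i hi)
    exact ⟨_, chain k i hi hk⟩
  refine ⟨⟨hGq, hRq⟩, fun i hi => ?_⟩
  obtain ⟨⟨k, hk⟩, _⟩ := rt_rootedAt p i (hroot i hi)
  exact rt_eq q i _ (chain k i hi hk)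

lemma getD_pstep (n : Nat) (p : List Int) (s : Nat) (hG : Good n p) (hs : s < n) :
    p.getD s 0 = ((pstep p s : Nat) : Int) := by
  obtain ⟨m, hm, he⟩ := hG.2 s hs
  have hm2 : pstep p s = m := by unfold pstep; rw [he]; simp
  rw [he, hm2]

lemma pyGetD_nat (n : Nat) (p : List Int) (s : Nat) (hlen : p.length = n) (hs : s < n) :
    PySem.List.pyGetD p (s : Int) 0 = p.getD s 0 := by
  have h2 : (s : Int) < p.length := by omega
  rw [pyGetD_idx p _ 0 (by omega) h2, idx_natCast _ _ (by omega)]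

lemma ufFind_spec_nat (n : Nat) (hn : 0 < n) :
    ∀ (fuel : Nat) (p : List Int) (s k : Nat), UFInv n p → s < n →
    (pstep p)^[k] s = rt p s → k < fuel →
    (ufFind fuel p (s : Int)).2 = ((rt p s : Nat) : Int) ∧
    UFInv n (ufFind fuel p (s : Int)).1 ∧
    (∀ i, i < n → rt (ufFind fuel p (s : Int)).1 i = rt p i) := by
  intro fuel
  induction fuel with
  | zero => intro p s k h hs hchain hk; omega
  | succ f ih =>
    intro p s k h hs hchain hk
    have hlen : p.length = n := h.1.1
    have hpx : PySem.List.pyGetD p (s : Int) 0 = ((pstep p s : Nat) : Int) := by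
      rw [pyGetD_nat n p s hlen hs]; exact getD_pstep n p s h.1 hs
    simp only [ufFind, hpx]
    split_ifs with hcond
    · have hroot : pstep p s = s := by exact_mod_cast hcond
      have hrts : rt p s = s := rt_eq p s s ⟨⟨0, rfl⟩, hroot⟩
      exact ⟨by simp [hrts], h, fun i hi => rfl⟩
    · have hroot : pstep p s ≠ s := fun hh => hcond (by exact_mod_cast hh)
      cases k with
      | zero =>
        exfalso
        simp only [Function.iterate_zero, id_eq] at hchain
        have : IsRoot p s := by rw [hchain]; exact isRoot_rt n p s h.2 hs
        exact hroot this
      | succ k =>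
        have hplt : pstep p s < n := pstep_lt n p s h.1 hs
        have hch' : (pstep p)^[k] (pstep p s) = rt p (pstep p s) := by
          rw [rt_pstep n p s h hs, ← Function.iterate_succ_apply]; exact hchain
        obtain ⟨hv, hinv, hpt⟩ := ih p (pstep p s) k h hplt hch' (by omega)
        have hlen1 : (ufFind f p ((pstep p s : Nat) : Int)).1.length = n := hinv.1.1
        have hrt1 : rt (ufFind f p ((pstep p s : Nat) : Int)).1 s = rt p s := hpt s hs
        have hv' : (ufFind f p ((pstep p s : Nat) : Int)).2 = ((rt p s : Nat) : Int) := by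
          rw [hv, rt_pstep n p s h hs]
        have hset : PySem.List.pySetD (ufFind f p ((pstep p s : Nat) : Int)).1 (s : Int)
            (ufFind f p ((pstep p s : Nat) : Int)).2
            = (ufFind f p ((pstep p s : Nat) : Int)).1.set s
              ((rt (ufFind f p ((pstep p s : Nat) : Int)).1 s : Nat) : Int) := by
          rw [hv', hrt1]
          have h2 : (s : Int) < (ufFind f p ((pstep p s : Nat) : Int)).1.length := by omega
          rw [pySetD_idx _ _ _ (by omega) h2, idx_natCast _ _ (by omega)]
        obtain ⟨hinv2, hpt2⟩ := compress n (ufFind f p ((pstep p s : Nat) : Int)).1 s hinv hs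
        refine ⟨hv', ?_, ?_⟩
        · show UFInv n (PySem.List.pySetD _ _ _)
          rw [hset]; exact hinv2
        · intro i hi
          show rt (PySem.List.pySetD _ _ _) i = rt p i
          rw [hset, hpt2 i hi, hpt i hi]

lemma ufFind_spec (n : Nat) (hn : 0 < n) (p : List Int) (x : Int) (h : UFInv n p)
    (h1 : -(n : Int) ≤ x) (h2 : x < n) :
    (ufFind (p.length + 1) p x).2 = ((rt p (idx n x) : Nat) : Int) ∧
    UFInv n (ufFind (p.length + 1) p x).1 ∧
    (∀ i, i < n → rt (ufFind (p.length + 1) p x).1 i = rt p i) := by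
  have hlen : p.length = n := h.1.1
  have hs : idx n x < n := idx_lt n x h1 h2
  rcases le_or_gt 0 x with hx | hx
  · have hxs : x = ((idx n x : Nat) : Int) := by unfold idx; split <;> omega
    obtain ⟨k, hk, hchain⟩ := shorten n p (idx n x) (rt p (idx n x)) h.1 hs
      (rt_rootedAt p _ (h.2 _ hs))
    rw [hxs]
    exact ufFind_spec_nat n hn (p.length + 1) p (idx n x) k h hs hchain (by omega)
  · have hpx : PySem.List.pyGetD p x 0 = ((pstep p (idx n x) : Nat) : Int) := by
      rw [pyGetD_idx p x 0 (by omega) (by omega), hlen]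
      exact getD_pstep n p (idx n x) h.1 hs
    simp only [ufFind, hpx]
    rw [if_neg (by intro hh; omega)]
    have hplt : pstep p (idx n x) < n := pstep_lt n p _ h.1 hs
    obtain ⟨k, hk, hchain⟩ := shorten n p (pstep p (idx n x)) (rt p (pstep p (idx n x))) h.1 hplt
      (rt_rootedAt p _ (h.2 _ hplt))
    obtain ⟨hv, hinv, hpt⟩ := ufFind_spec_nat n hn p.length p (pstep p (idx n x)) k h hplt hchain (by omega)
    have hrtp : rt p (pstep p (idx n x)) = rt p (idx n x) := rt_pstep n p _ h hs
    have hlen1 : (ufFind p.length p ((pstep p (idx n x) : Nat) : Int)).1.length = n := hinv.1.1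
    have hrt1 : rt (ufFind p.length p ((pstep p (idx n x) : Nat) : Int)).1 (idx n x) = rt p (idx n x) :=
      hpt _ hs
    have hv' : (ufFind p.length p ((pstep p (idx n x) : Nat) : Int)).2 = ((rt p (idx n x) : Nat) : Int) := by
      rw [hv, hrtp]
    have hset : PySem.List.pySetD (ufFind p.length p ((pstep p (idx n x) : Nat) : Int)).1 x
        (ufFind p.length p ((pstep p (idx n x) : Nat) : Int)).2
        = (ufFind p.length p ((pstep p (idx n x) : Nat) : Int)).1.set (idx n x)
          ((rt (ufFind p.length p ((pstep p (idx n x) : Nat) : Int)).1 (idx n x) : Nat) : Int) := by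
      rw [hv', hrt1]
      rw [pySetD_idx _ _ _ (by omega) (by omega), hlen1]
    obtain ⟨hinv2, hpt2⟩ := compress n (ufFind p.length p ((pstep p (idx n x) : Nat) : Int)).1
      (idx n x) hinv hs
    refine ⟨hv', ?_, ?_⟩
    · show UFInv n (PySem.List.pySetD _ _ _)
      rw [hset]; exact hinv2
    · intro i hi
      show rt (PySem.List.pySetD _ _ _) i = rt p i
      rw [hset, hpt2 i hi, hpt i hi]

lemma ufUnion_spec (n : Nat) (hn : 0 < n) (st : List Int × List Int) (x y : Int)
    (h : UFInv n st.1) (hlen2 : st.2.length = n)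
    (hx1 : -(n : Int) ≤ x) (hx2 : x < n) (hy1 : -(n : Int) ≤ y) (hy2 : y < n) :
    UFInv n (ufUnion st x y).1 ∧ (ufUnion st x y).2.length = n ∧
    ∃ a b : Nat,
      ((a = rt st.1 (idx n x) ∧ b = rt st.1 (idx n y)) ∨
       (a = rt st.1 (idx n y) ∧ b = rt st.1 (idx n x))) ∧
      ∀ i, i < n → rt (ufUnion st x y).1 i = if rt st.1 i = b then a else rt st.1 i := by
  have hlen1 : st.1.length = n := h.1.1
  have hsx : idx n x < n := idx_lt n x hx1 hx2
  have hsy : idx n y < n := idx_lt n y hy1 hy2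
  show UFInv n (ufUnion st x y).1 ∧ _
  simp only [ufUnion]
  set fx := ufFind (st.1.length + 1) st.1 x with hfx
  set fy := ufFind (fx.1.length + 1) fx.1 y with hfy
  obtain ⟨hv1, hinv1, hpt1⟩ := ufFind_spec n hn st.1 x h hx1 hx2
  rw [← hfx] at hv1 hinv1 hpt1
  obtain ⟨hv2, hinv2, hpt2⟩ := ufFind_spec n hn fx.1 y hinv1 hy1 hy2
  rw [← hfy] at hv2 hinv2 hpt2
  set rx := rt st.1 (idx n x) with hrx0
  set ry := rt st.1 (idx n y) with hry0
  have hpt : ∀ i, i < n → rt fy.1 i = rt st.1 i := fun i hi => (hpt2 i hi).trans (hpt1 i hi)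
  have hry : fy.2 = ((ry : Nat) : Int) := by rw [hv2, hpt1 _ hsy]
  have hrxlt : rx < n := rt_lt n st.1 _ h hsx
  have hrylt : ry < n := rt_lt n st.1 _ h hsy
  have hlenfy : fy.1.length = n := hinv2.1.1
  have hrootx : IsRoot fy.1 rx := by
    rw [hrx0, ← hpt _ hsx]; exact isRoot_rt n fy.1 _ hinv2.2 hsx
  have hrooty : IsRoot fy.1 ry := by
    rw [hry0, ← hpt _ hsy]; exact isRoot_rt n fy.1 _ hinv2.2 hsy
  split_ifs with hc1 hc2 hc3
  · have heqr : rx = ry := by rw [hv1, hry] at hc1; exact_mod_cast hc1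
    refine ⟨hinv2, hlen2, rx, ry, Or.inl ⟨rfl, rfl⟩, fun i hi => ?_⟩
    rw [hpt i hi]
    split_ifs with hcond
    · rw [hcond, heqr]
    · rfl
  · have hne : rx ≠ ry := by
      intro hh; exact hc1 (by rw [hv1, hry, hh])
    have hsetxy : PySem.List.pySetD fy.1 fy.2 fx.2 = fy.1.set ry ((rx : Nat) : Int) := by
      rw [hv1, hry, pySetD_idx _ _ _ (by omega) (by omega), hlenfy, idx_natCast _ _ hrylt]
    obtain ⟨hinvL, hptL⟩ := link n fy.1 rx ry hinv2 hrxlt hrylt hrootx hrooty hne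
    refine ⟨by rw [hsetxy]; exact hinvL, hlen2, rx, ry, Or.inl ⟨rfl, rfl⟩, fun i hi => ?_⟩
    rw [hsetxy, hptL i hi, hpt i hi]
  · have hne : ry ≠ rx := by
      intro hh; exact hc1 (by rw [hv1, hry, hh])
    have hsetxy : PySem.List.pySetD fy.1 fx.2 fy.2 = fy.1.set rx ((ry : Nat) : Int) := by
      rw [hv1, hry, pySetD_idx _ _ _ (by omega) (by omega), hlenfy, idx_natCast _ _ hrxlt]
    obtain ⟨hinvL, hptL⟩ := link n fy.1 ry rx hinv2 hrylt hrxlt hrooty hrootx hne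
    refine ⟨by rw [hsetxy]; exact hinvL, hlen2, ry, rx, Or.inr ⟨rfl, rfl⟩, fun i hi => ?_⟩
    rw [hsetxy, hptL i hi, hpt i hi]
  · have hne : rx ≠ ry := by
      intro hh; exact hc1 (by rw [hv1, hry, hh])
    have hsetxy : PySem.List.pySetD fy.1 fy.2 fx.2 = fy.1.set ry ((rx : Nat) : Int) := by
      rw [hv1, hry, pySetD_idx _ _ _ (by omega) (by omega), hlenfy, idx_natCast _ _ hrylt]
    obtain ⟨hinvL, hptL⟩ := link n fy.1 rx ry hinv2 hrxlt hrylt hrootx hrooty hne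
    refine ⟨by rw [hsetxy]; exact hinvL, ?_, rx, ry, Or.inl ⟨rfl, rfl⟩, fun i hi => ?_⟩
    · rw [PySem.List.length_pySetD]; exact hlen2
    · rw [hsetxy, hptL i hi, hpt i hi]

-- one union step preserves RepL (for the accumulated normalized edges)
lemma ufUnion_rep (n : Nat) (hn : 0 < n) (st : List Int × List Int) (x y : Int)
    (es : List (Nat × Nat)) (h : UFInv n st.1) (hlen2 : st.2.length = n)
    (hrep : RepL n (rt st.1) es)
    (hx1 : -(n : Int) ≤ x) (hx2 : x < n) (hy1 : -(n : Int) ≤ y) (hy2 : y < n) :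
    UFInv n (ufUnion st x y).1 ∧ (ufUnion st x y).2.length = n ∧
    RepL n (rt (ufUnion st x y).1) (es ++ [(idx n x, idx n y)]) := by
  have hsx : idx n x < n := idx_lt n x hx1 hx2
  have hsy : idx n y < n := idx_lt n y hy1 hy2
  obtain ⟨hinv, hlen2', a, b, hab, hform⟩ :=
    ufUnion_spec n hn st x y h hlen2 hx1 hx2 hy1 hy2
  refine ⟨hinv, hlen2', ?_⟩
  rcases hab with ⟨ha, hb⟩ | ⟨ha, hb⟩
  · exact rep_merge n (rt st.1) (rt (ufUnion st x y).1) es (idx n x) (idx n y) hsx hsy hrep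
      (fun i hi => by rw [hform i hi, ha, hb])
  · exact rep_swap n _ es (idx n x) (idx n y)
      (rep_merge n (rt st.1) (rt (ufUnion st x y).1) es (idx n y) (idx n x) hsy hsx hrep
        (fun i hi => by rw [hform i hi, ha, hb]))

lemma ufFold_spec (n : Nat) (hn : 0 < n) :
    ∀ (edges : List (Int × Int)) (st : List Int × List Int) (es : List (Nat × Nat)),
    UFInv n st.1 → st.2.length = n → RepL n (rt st.1) es →
    (∀ e ∈ edges, (-(n : Int) ≤ e.1 ∧ e.1 < n) ∧ (-(n : Int) ≤ e.2 ∧ e.2 < n)) →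
    UFInv n (edges.foldl (fun st e => ufUnion st e.1 e.2) st).1 ∧
    RepL n (rt (edges.foldl (fun st e => ufUnion st e.1 e.2) st).1)
      (es ++ edges.map (fun e => (idx n e.1, idx n e.2))) := by
  intro edges
  induction edges with
  | nil => intro st es h1 h2 h3 _; simpa using ⟨h1, h3⟩
  | cons e rest ih =>
    intro st es h1 h2 h3 hb
    have hbe := hb e List.mem_cons_self
    obtain ⟨hinv, hlen2, hrep'⟩ := ufUnion_rep n hn st e.1 e.2 es h1 h2 h3
      hbe.1.1 hbe.1.2 hbe.2.1 hbe.2.2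
    have hrest := ih (ufUnion st e.1 e.2) (es ++ [(idx n e.1, idx n e.2)]) hinv hlen2 hrep'
      (fun e' he' => hb e' (List.mem_cons_of_mem _ he'))
    simpa [List.append_assoc] using hrest

-- ---- initial state, final passes, and assembly ----

lemma pyRange_len (n : Nat) : (PySem.List.pyRange 0 (n : Int) 1).length = n := by
  rw [PySem.List.length_pyRange_one]; simp

lemma pyRange_getD (n i : Nat) (hi : i < n) :
    (PySem.List.pyRange 0 (n : Int) 1).getD i 0 = (i : Int) := by
  rw [PySem.List.pyRange_one]
  have h : i < ((n : Int) - 0).toNat := by omega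
  have h2 : i < (List.range n).length := by simpa using hi
  simp [List.getD, List.getElem?_map, List.getElem?_eq_getElem h2]

lemma getD_lt (l : List Int) (i : Nat) (h : i < l.length) : l.getD i 0 = l[i] := by
  simp [List.getD, List.getElem?_eq_getElem h]

lemma getD_mem (l : List Int) (i : Nat) (h : i < l.length) : l.getD i 0 ∈ l := by
  rw [getD_lt l i h]
  exact List.getElem_mem h

lemma getD_map_lt (l : List Int) (f : Int → Int) (i : Nat) (h : i < l.length) :
    (l.map f).getD i 0 = f (l.getD i 0) := by
  simp [List.getD, List.getElem?_eq_getElem h]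

lemma init_good (n : Nat) : Good n (PySem.List.pyRange 0 (n : Int) 1) :=
  ⟨pyRange_len n, fun i hi => ⟨i, hi, pyRange_getD n i hi⟩⟩

lemma init_pstep (n i : Nat) (hi : i < n) : pstep (PySem.List.pyRange 0 (n : Int) 1) i = i := by
  unfold pstep; rw [pyRange_getD n i hi]; simp

lemma init_rt (n i : Nat) (hi : i < n) : rt (PySem.List.pyRange 0 (n : Int) 1) i = i :=
  rt_eq _ i i ⟨⟨0, rfl⟩, init_pstep n i hi⟩

lemma init_inv (n : Nat) : UFInv n (PySem.List.pyRange 0 (n : Int) 1) :=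
  ⟨init_good n, fun i hi => ⟨i, ⟨0, rfl⟩, init_pstep n i hi⟩⟩

lemma init_rep (n : Nat) : RepL n (rt (PySem.List.pyRange 0 (n : Int) 1)) [] := by
  intro i j hi hj
  rw [init_rt n i hi, init_rt n j hj, conn_nil]

lemma init_repB (n : Nat) : RepL n (fun i => (PySem.List.pyRange 0 (n : Int) 1).getD i 0) [] := by
  intro i j hi hj
  show (PySem.List.pyRange 0 (n : Int) 1).getD i 0 = (PySem.List.pyRange 0 (n : Int) 1).getD j 0 ↔ _
  rw [pyRange_getD n i hi, pyRange_getD n j hj, conn_nil]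
  exact Int.natCast_inj

lemma finLoop (n : Nat) (hn : 0 < n) :
    ∀ (l : List Int) (p : List Int) (S : PySem.Set Int), UFInv n p →
    (∀ i ∈ l, ∃ s : Nat, s < n ∧ i = (s : Int)) →
    (l.foldl (fun (acc : List Int × PySem.Set Int) i =>
        ((ufFind (acc.1.length + 1) acc.1 i).1,
          PySem.Set.add acc.2 (ufFind (acc.1.length + 1) acc.1 i).2)) (p, S)).2
      = (l.map (fun i => ((rt p (idx n i) : Nat) : Int))).foldl PySem.Set.add S := by
  intro l
  induction l with
  | nil => intro p S h hb; rfl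
  | cons i rest ih =>
    intro p S h hb
    obtain ⟨sv, hsv, hisv⟩ := hb i List.mem_cons_self
    subst hisv
    have hsx : idx n (sv : Int) < n := idx_lt n _ (by omega) (by omega)
    obtain ⟨hv, hinv, hpt⟩ := ufFind_spec n hn p (sv : Int) h (by omega) (by omega)
    simp only [List.foldl_cons, List.map_cons]
    rw [ih _ _ hinv (fun i hi => hb i (List.mem_cons_of_mem _ hi))]
    rw [hv]
    congr 1
    apply List.map_congr_left
    intro a ha
    obtain ⟨sa, hsa, rfl⟩ := hb a (List.mem_cons_of_mem _ ha)
    rw [hpt _ (idx_lt n _ (by omega) (by omega))]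

lemma foldl_add_len_one (L : List Int) (hL : L ≠ []) :
    ((L.foldl PySem.Set.add PySem.Set.empty).length = 1) ↔ ∃ c, ∀ x ∈ L, x = c := by
  have hofl : L.foldl PySem.Set.add PySem.Set.empty = PySem.Set.ofList L :=
    (PySem.Set.ofList_eq_foldl L).symm
  rw [hofl]
  constructor
  · intro h1
    rcases hl2 : PySem.Set.ofList L with _ | ⟨a, t⟩
    · rw [hl2] at h1; simp at h1
    · rw [hl2] at h1
      have hteq : t = [] := by
        simp only [List.length_cons] at h1
        exact List.length_eq_zero_iff.mp (by omega)
      subst hteq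
      refine ⟨a, fun x hx => ?_⟩
      have hx2 : x ∈ PySem.Set.ofList L := (PySem.Set.mem_ofList L x).mpr hx
      rw [hl2] at hx2
      simpa using hx2
  · rintro ⟨c, hc⟩
    have hcL : c ∈ L := by
      rcases L with _ | ⟨a, t⟩
      · exact absurd rfl hL
      · have := hc a List.mem_cons_self
        rw [← this]; exact List.mem_cons_self
    have hall : ∀ x ∈ PySem.Set.ofList L, x = c := fun x hx =>
      hc x ((PySem.Set.mem_ofList L x).mp hx)
    have hcin : c ∈ PySem.Set.ofList L := (PySem.Set.mem_ofList L c).mpr hcL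
    have hnd : (PySem.Set.ofList L).Nodup := PySem.Set.nodup_ofList L
    rcases hl2 : PySem.Set.ofList L with _ | ⟨a, t⟩
    · rw [hl2] at hcin; simp at hcin
    · rw [hl2] at hall hnd
      have hteq : t = [] := by
        rw [List.eq_nil_iff_forall_not_mem]
        intro y hy
        have hya : y = a := by
          rw [hall y (List.mem_cons_of_mem _ hy), hall a List.mem_cons_self]
        rw [hya] at hy
        exact (List.nodup_cons.mp hnd).1 hy
      rw [hteq]
      rfl

lemma compFold (n : Nat) (_hn : 0 < n) :
    ∀ (edges : List (Int × Int)) (comp : List Int) (es : List (Nat × Nat)),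
    comp.length = n → RepL n (fun i => comp.getD i 0) es →
    (∀ e ∈ edges, (-(n : Int) ≤ e.1 ∧ e.1 < n) ∧ (-(n : Int) ≤ e.2 ∧ e.2 < n)) →
    (edges.foldl (fun comp (e : Int × Int) =>
      let cu := PySem.List.pyGetD comp e.1 0
      let cv := PySem.List.pyGetD comp e.2 0
      if cu ≠ cv then comp.map (fun c => if c = cv then cu else c) else comp) comp).length = n ∧
    RepL n (fun i => (edges.foldl (fun comp (e : Int × Int) =>
      let cu := PySem.List.pyGetD comp e.1 0
      let cv := PySem.List.pyGetD comp e.2 0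
      if cu ≠ cv then comp.map (fun c => if c = cv then cu else c) else comp) comp).getD i 0)
      (es ++ edges.map (fun e => (idx n e.1, idx n e.2))) := by
  intro edges
  induction edges with
  | nil => intro comp es h1 h2 _; simpa using ⟨h1, h2⟩
  | cons e rest ih =>
    intro comp es h1 h2 hb
    obtain ⟨⟨he11, he12⟩, he21, he22⟩ := hb e List.mem_cons_self
    have hsu : idx n e.1 < n := idx_lt n e.1 he11 he12
    have hsv : idx n e.2 < n := idx_lt n e.2 he21 he22
    have hcu : PySem.List.pyGetD comp e.1 0 = comp.getD (idx n e.1) 0 := by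
      rw [pyGetD_idx comp e.1 0 (by omega) (by omega), h1]
    have hcv : PySem.List.pyGetD comp e.2 0 = comp.getD (idx n e.2) 0 := by
      rw [pyGetD_idx comp e.2 0 (by omega) (by omega), h1]
    simp only [List.foldl_cons, List.map_cons]
    have hrest : ∀ e' ∈ rest, (-(n : Int) ≤ e'.1 ∧ e'.1 < n) ∧ (-(n : Int) ≤ e'.2 ∧ e'.2 < n) :=
      fun e' he' => hb e' (List.mem_cons_of_mem _ he')
    have hlen' : (if PySem.List.pyGetD comp e.1 0 = PySem.List.pyGetD comp e.2 0 then comp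
        else List.map (fun c => if c = PySem.List.pyGetD comp e.2 0
          then PySem.List.pyGetD comp e.1 0 else c) comp).length = n := by
      split_ifs <;> simpa using h1
    have hrep' : RepL n (fun i => (if PySem.List.pyGetD comp e.1 0 = PySem.List.pyGetD comp e.2 0 then comp
        else List.map (fun c => if c = PySem.List.pyGetD comp e.2 0
          then PySem.List.pyGetD comp e.1 0 else c) comp).getD i 0)
        (es ++ [(idx n e.1, idx n e.2)]) := by
      by_cases hne : PySem.List.pyGetD comp e.1 0 = PySem.List.pyGetD comp e.2 0
      · rw [if_pos hne]
        apply rep_merge n (fun i => comp.getD i 0) _ es (idx n e.1) (idx n e.2) hsu hsv h2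
        intro i hi
        show comp.getD i 0 = if comp.getD i 0 = comp.getD (idx n e.2) 0
          then comp.getD (idx n e.1) 0 else comp.getD i 0
        have he : comp.getD (idx n e.1) 0 = comp.getD (idx n e.2) 0 := by
          rw [← hcu, ← hcv, hne]
        split_ifs with hc
        · rw [he, ← hc]
        · rfl
      · rw [if_neg hne]
        apply rep_merge n (fun i => comp.getD i 0) _ es (idx n e.1) (idx n e.2) hsu hsv h2
        intro i hi
        show (comp.map _).getD i 0 = _
        rw [getD_map_lt _ _ i (by omega), hcu, hcv]
    have hres := ih (if PySem.List.pyGetD comp e.1 0 = PySem.List.pyGetD comp e.2 0 then comp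
        else List.map (fun c => if c = PySem.List.pyGetD comp e.2 0
          then PySem.List.pyGetD comp e.1 0 else c) comp)
      (es ++ [(idx n e.1, idx n e.2)]) hlen' hrep' hrest
    simpa [List.append_assoc] using hres

-- ===== VERDICT (by name: the statement is the Claim_ definition above) =====
lemma idx_zero (n : Nat) : idx n (0 : Int) = 0 := by simp [idx]

theorem is_valid_tree_detect_connection_spec : Claim_equal_is_valid_tree_detect_connection := by
  unfold Claim_equal_is_valid_tree_detect_connection
  intro N edges hdom hpre
  unfold Spec_is_valid_tree_detect_connection
  by_cases hg : (edges.length : Int) ≠ N - 1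
  · unfold is_valid_tree_detect_connection is_valid_tree_detect_connection_alt
    rw [if_pos hg, if_pos hg]
  · rw [not_ne_iff] at hg
    have hn : 0 < N.toNat := by omega
    set n := N.toNat with hndef
    have hNn : (n : Int) = N := by omega
    have hb' : ∀ e ∈ edges, (-(n : Int) ≤ e.1 ∧ e.1 < n) ∧ (-(n : Int) ≤ e.2 ∧ e.2 < n) := by
      intro e he
      rw [hNn]
      exact hpre hg e he
    have hA : (is_valid_tree_detect_connection N edges = true) ↔
        ∀ s, s < n → ConnE (edges.map (fun e => (idx n e.1, idx n e.2))) s 0 := by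
      unfold is_valid_tree_detect_connection
      rw [if_neg (not_ne_iff.mpr hg)]
      simp only []
      rw [← hNn]
      simp only [Int.toNat_natCast]
      obtain ⟨hinvF, hrepF⟩ := ufFold_spec n hn edges
        (PySem.List.pyRange 0 ((n : Nat) : Int) 1, List.replicate n (1 : Int)) []
        (init_inv n) (by simp) (init_rep n) hb'
      rw [List.nil_append] at hrepF
      set F := List.foldl (fun st e => ufUnion st e.1 e.2)
        (PySem.List.pyRange 0 ((n : Nat) : Int) 1, List.replicate n (1 : Int)) edges with hF
      rw [finLoop n hn (PySem.List.pyRange 0 ((n : Nat) : Int) 1) F.1 PySem.Set.empty hinvF (by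
        intro i hi
        rw [PySem.List.mem_pyRange_one] at hi
        exact ⟨i.toNat, by omega, by omega⟩)]
      rw [beq_iff_eq, foldl_add_len_one _ (by
        intro hcon
        have hlencon := congrArg List.length hcon
        rw [List.length_map, pyRange_len, List.length_nil] at hlencon
        omega)]
      constructor
      · rintro ⟨c, hc⟩ s hs
        have heq1 := hc _ (List.mem_map.mpr
          ⟨((s : Nat) : Int), by rw [PySem.List.mem_pyRange_one]; omega, rfl⟩)
        have heq2 := hc _ (List.mem_map.mpr
          ⟨(0 : Int), by rw [PySem.List.mem_pyRange_one]; omega, rfl⟩)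
        have heq := heq1.trans heq2.symm
        rw [idx_natCast n s hs, idx_zero n] at heq
        exact (hrepF s 0 hs hn).mp (by exact_mod_cast heq)
      · intro hall
        refine ⟨((rt F.1 (idx n (0 : Int)) : Nat) : Int), fun x hx => ?_⟩
        obtain ⟨i, hi, rfl⟩ := List.mem_map.mp hx
        rw [PySem.List.mem_pyRange_one] at hi
        have hidx : idx n i < n := idx_lt n i (by omega) (by omega)
        rw [idx_zero n]
        have := (hrepF (idx n i) 0 hidx hn).mpr (hall _ hidx)
        rw [this]
    have hB : (is_valid_tree_detect_connection_alt N edges = true) ↔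
        ∀ s, s < n → ConnE (edges.map (fun e => (idx n e.1, idx n e.2))) s 0 := by
      unfold is_valid_tree_detect_connection_alt
      rw [if_neg (not_ne_iff.mpr hg)]
      simp only []
      rw [← hNn]
      obtain ⟨hlenB, hrepB⟩ := compFold n hn edges (PySem.List.pyRange 0 ((n : Nat) : Int) 1) []
        (pyRange_len n) (init_repB n) hb'
      rw [List.nil_append] at hrepB
      rw [List.all_eq_true]
      have hlenB' : (List.foldl (fun comp (e : Int × Int) =>
          if PySem.List.pyGetD comp e.1 0 ≠ PySem.List.pyGetD comp e.2 0 then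
            List.map (fun c => if c = PySem.List.pyGetD comp e.2 0
              then PySem.List.pyGetD comp e.1 0 else c) comp
          else comp) (PySem.List.pyRange 0 ((n : Nat) : Int) 1) edges).length = n := hlenB
      have hrepB' : RepL n (fun i => (List.foldl (fun comp (e : Int × Int) =>
          if PySem.List.pyGetD comp e.1 0 ≠ PySem.List.pyGetD comp e.2 0 then
            List.map (fun c => if c = PySem.List.pyGetD comp e.2 0
              then PySem.List.pyGetD comp e.1 0 else c) comp
          else comp) (PySem.List.pyRange 0 ((n : Nat) : Int) 1) edges).getD i 0)
          (edges.map (fun e => (idx n e.1, idx n e.2))) := hrepB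
      have hC0 : PySem.List.pyGetD (List.foldl (fun comp (e : Int × Int) =>
          if PySem.List.pyGetD comp e.1 0 ≠ PySem.List.pyGetD comp e.2 0 then
            List.map (fun c => if c = PySem.List.pyGetD comp e.2 0
              then PySem.List.pyGetD comp e.1 0 else c) comp
          else comp) (PySem.List.pyRange 0 ((n : Nat) : Int) 1) edges) 0 0 = (List.foldl (fun comp (e : Int × Int) =>
          if PySem.List.pyGetD comp e.1 0 ≠ PySem.List.pyGetD comp e.2 0 then
            List.map (fun c => if c = PySem.List.pyGetD comp e.2 0
              then PySem.List.pyGetD comp e.1 0 else c) comp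
          else comp) (PySem.List.pyRange 0 ((n : Nat) : Int) 1) edges).getD 0 0 := by
        rw [pyGetD_idx _ 0 0 (by omega) (by omega), hlenB', idx_zero n]
      constructor
      · intro hall s hs
        have h1 := hall _ (getD_mem _ s (by omega))
        rw [beq_iff_eq, hC0] at h1
        exact (hrepB' s 0 hs hn).mp h1
      · intro hall c hc
        obtain ⟨i, hilt, rfl⟩ := List.mem_iff_getElem.mp hc
        rw [beq_iff_eq, hC0, ← getD_lt _ i hilt]
        exact (hrepB' i 0 (by omega) hn).mpr (hall i (by omega))
    have hAB := hA.trans hB.symm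
    cases hA' : is_valid_tree_detect_connection N edges <;>
      cases hB' : is_valid_tree_detect_connection_alt N edges
    · rfl
    · rw [hA', hB'] at hAB; simp at hAB
    · rw [hA', hB'] at hAB; simp at hAB
    · rfl
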